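-- pv_equiv track=rewrite | github.com/Zorz42/turingcomplete_compiler | jaclang/preprocessor/preprocessor.py | removeSingleLineComments
-- ===== SOURCE A (Python) =====
-- def removeSingleLineComments(code: str) -> str:
--     new_code = ""
--     is_in_comment = False
--     for i, c in enumerate(code):
--         if i < len(code) - 1 and c == '/' and code[i + 1] == '/':
--             is_in_comment = True
--
--         if c == '\n':
--             is_in_comment = False
--
--         new_code += " " if is_in_comment else c
--
--     return new_code
-- ===== SOURCE B (Python) =====
-- def removeSingleLineComments(code: str) -> str:
--     lines = []
--     for line in code.split('\n'):
--         idx = line.find('//')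
--         if idx != -1:
--             line = line[:idx] + ' ' * (len(line) - idx)
--         lines.append(line)
--     return '\n'.join(lines)
-- ===== Notes on version B (the rewrite author's own statement) =====
-- stated objective: simpler
-- what changed: Replaces the per-character enumerate loop with lookahead and an is_in_comment flag (building the result by repeated string +=) by a per-line pass: split on newline, blank each line from its first occurrence of the comment marker via str.find and slicing, join back.
import Mathlib
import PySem

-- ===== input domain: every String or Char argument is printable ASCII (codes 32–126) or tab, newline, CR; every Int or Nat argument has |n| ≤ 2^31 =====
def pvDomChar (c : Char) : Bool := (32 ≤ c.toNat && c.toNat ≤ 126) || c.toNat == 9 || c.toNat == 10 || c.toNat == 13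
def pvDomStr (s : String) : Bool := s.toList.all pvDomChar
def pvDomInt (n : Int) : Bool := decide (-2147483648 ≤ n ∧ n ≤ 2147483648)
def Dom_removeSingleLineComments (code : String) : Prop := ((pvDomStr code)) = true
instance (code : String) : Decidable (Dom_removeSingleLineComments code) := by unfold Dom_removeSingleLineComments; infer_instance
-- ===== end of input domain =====

-- B replaces A's per-character is_in_comment state machine by a per-line pass
-- (split on '\n', blank each line from its first "//", join back); objective: simpler.

-- ===== PORT A =====
-- literal transliteration of A: enumerate the characters, an is_in_comment flag,
-- lookahead code[i+1], a growing output string.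
def removeSingleLineComments (code : String) : String :=
  let st := (PySem.List.enumerate code.toList 0).foldl
    (fun (st : List Char × Bool) (p : Int × Char) =>
      let b := if p.1 < PySem.Str.len code - 1 ∧ p.2 = '/' ∧ PySem.Str.pyGet? code (p.1 + 1) = some '/'
               then true else st.2
      let b := if p.2 = '\n' then false else b
      (st.1 ++ [if b then ' ' else p.2], b))
    ([], false)
  String.mk st.1

-- ===== PORT B =====
-- literal transliteration of B: split on '\n', per line find "//" and blank the tail, join.
def removeSingleLineComments_alt (code : String) : String :=
  let lines := PySem.Chars.splitOn code.toList ['\n']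
  let outLines := lines.map (fun line =>
    let idx := PySem.Chars.find line ['/', '/']
    if idx ≠ -1 then
      PySem.Chars.slice line none (some idx) ++ PySem.List.pyRepeat [' '] ((line.length : Int) - idx)
    else line)
  String.mk (PySem.Chars.join ['\n'] outLines)

-- ===== PRECONDITION & SPEC =====
def Spec_removeSingleLineComments (code : String) (out : String) : Prop := out = removeSingleLineComments_alt code
instance (code : String) (out : String) : Decidable (Spec_removeSingleLineComments code out) := by unfold Spec_removeSingleLineComments; infer_instance

-- ===== CLAIM (what is proved, stated in full; the proofs are below) =====
def Claim_equal_removeSingleLineComments : Prop := ∀ (code : String), Dom_removeSingleLineComments code → Spec_removeSingleLineComments code (removeSingleLineComments code)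

-- ===== LEMMAS AND PROOFS =====

-- A's loop as a structural recursion: the comment flag is b, the lookahead is rest.head?.
def procA : Bool → List Char → List Char
  | _, [] => []
  | b, c :: rest =>
    let b1 := if c = '/' ∧ rest.head? = some '/' then true else b
    let b2 := if c = '\n' then false else b1
    (if b2 then ' ' else c) :: procA b2 rest

-- B's per-line transform (the body of the map in port B).
def blankLine (line : List Char) : List Char :=
  let idx := PySem.Chars.find line ['/', '/']
  if idx ≠ -1 then
    PySem.Chars.slice line none (some idx) ++ PySem.List.pyRepeat [' '] ((line.length : Int) - idx)
  else line

-- the '\n'-split of a char list, structurally.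
def linesOf : List Char → List (List Char)
  | [] => [[]]
  | c :: rest => if c = '\n' then [] :: linesOf rest else (linesOf rest).modifyHead (c :: ·)

theorem linesOf_ne_nil (l : List Char) : linesOf l ≠ [] := by
  induction l with
  | nil => simp [linesOf]
  | cons c rest ih =>
    simp only [linesOf]
    split
    · simp
    · cases h : linesOf rest with
      | nil => exact absurd h ih
      | cons a t => simp [List.modifyHead]

theorem splitOn_go_spec (fuel : Nat) :
    ∀ (l cur : List Char) (acc : List (List Char)), l.length < fuel →
      PySem.Chars.splitOn.go ['\n'] fuel l cur acc
        = acc.reverse ++ (linesOf l).modifyHead (cur.reverse ++ ·) := by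
  induction fuel with
  | zero => intro l cur acc h; omega
  | succ f ih =>
    intro l cur acc h
    cases l with
    | nil =>
      simp [PySem.Chars.splitOn.go, linesOf, List.modifyHead]
    | cons c rest =>
      simp only [PySem.Chars.splitOn.go]
      by_cases hc : c = '\n'
      · subst hc
        rw [if_pos (by simp [List.isPrefixOf])]
        simp only [List.length_cons, List.length_nil, List.drop_succ_cons, List.drop_zero]
        rw [ih rest [] (cur.reverse :: acc) (by simp at h ⊢; omega)]
        simp [linesOf]
        cases hl : linesOf rest with
        | nil => exact absurd hl (linesOf_ne_nil rest)
        | cons a t => simp [List.modifyHead]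
      · rw [if_neg (by simp [List.isPrefixOf]; intro h'; exact hc h'.symm)]
        rw [ih rest (c :: cur) acc (by simp at h ⊢; omega)]
        have hne := linesOf_ne_nil rest
        simp [linesOf, hc]
        cases hl : linesOf rest with
        | nil => exact absurd hl hne
        | cons a t => simp [List.modifyHead]

theorem splitOn_eq_linesOf (l : List Char) :
    PySem.Chars.splitOn l ['\n'] = linesOf l := by
  show PySem.Chars.splitOn.go ['\n'] (l.length + 1) l [] [] = _
  rw [splitOn_go_spec (l.length + 1) l [] [] (by omega)]
  cases hl : linesOf l with
  | nil => exact absurd hl (linesOf_ne_nil l)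
  | cons a t => simp [List.modifyHead]

theorem prefix_slash_iff (c : Char) (rest : List Char) :
    ['/', '/'] <+: (c :: rest) ↔ c = '/' ∧ rest.head? = some '/' := by
  cases rest with
  | nil => constructor
           · intro h; have := h.length_le; simp at this
           · rintro ⟨-, h⟩; simp at h
  | cons d t =>
    constructor
    · intro h
      rcases h with ⟨s, hs⟩
      simp at hs
      exact ⟨hs.1.symm, by rw [List.head?_cons, ← hs.2.1]⟩
    · rintro ⟨rfl, h⟩
      simp at h
      exact ⟨t, by simp [h]⟩

theorem find_of_prefix (l : List Char) (h : ['/', '/'] <+: l) :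
    PySem.Chars.find l ['/', '/'] = 0 := by
  have hnn : 0 ≤ PySem.Chars.find l ['/', '/'] :=
    (PySem.Chars.find_nonneg_iff l _).2 h.isInfix
  obtain ⟨h1, h2⟩ := PySem.Chars.find_spec hnn
  by_contra hne
  have : (0:Nat) < (PySem.Chars.find l ['/', '/']).toNat := by omega
  exact h2 0 this (by simpa using h)

theorem find_cons_of_not_prefix (c : Char) (rest : List Char)
    (h : ¬ ['/', '/'] <+: (c :: rest)) :
    PySem.Chars.find (c :: rest) ['/', '/']
      = if PySem.Chars.find rest ['/', '/'] = -1 then -1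
        else PySem.Chars.find rest ['/', '/'] + 1 := by
  by_cases hr : PySem.Chars.find rest ['/', '/'] = -1
  · rw [if_pos hr]
    rw [PySem.Chars.find_eq_neg_one_iff] at hr ⊢
    rw [List.infix_cons_iff]
    rintro (h' | h')
    exacts [h h', hr h']
  · rw [if_neg hr]
    have hnn : 0 ≤ PySem.Chars.find rest ['/', '/'] := by
      have := PySem.Chars.neg_one_le_find rest ['/', '/']
      omega
    obtain ⟨hp, hmin⟩ := PySem.Chars.find_spec hnn
    have hinl : ['/', '/'] <:+: (c :: rest) :=
      List.infix_cons_iff.2 (Or.inr ((PySem.Chars.find_nonneg_iff rest _).1 hnn))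
    have hnn2 : 0 ≤ PySem.Chars.find (c :: rest) ['/', '/'] :=
      (PySem.Chars.find_nonneg_iff _ _).2 hinl
    obtain ⟨hp2, hmin2⟩ := PySem.Chars.find_spec hnn2
    set j := (PySem.Chars.find rest ['/', '/']).toNat with hj
    set m := (PySem.Chars.find (c :: rest) ['/', '/']).toNat with hm
    have hm0 : m ≠ 0 := by
      intro h0
      rw [h0] at hp2
      exact h (by simpa using hp2)
    have hpj : ['/', '/'] <+: List.drop (j+1) (c :: rest) := by simpa using hp
    have hle1 : m ≤ j + 1 := by
      by_contra hlt
      exact hmin2 (j+1) (by omega) hpj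
    have hle2 : j + 1 ≤ m := by
      by_contra hlt
      have hpm : ['/', '/'] <+: List.drop (m-1) rest := by
        have hm1 : m = (m-1)+1 := by omega
        rw [hm1, List.drop_succ_cons] at hp2
        exact hp2
      have hmj : m - 1 < j := by omega
      exact hmin (m-1) hmj hpm
    have e1 := Int.toNat_of_nonneg hnn
    have e2 := Int.toNat_of_nonneg hnn2
    omega

theorem procA_true_blank (l : List Char) (h : '\n' ∉ l) :
    procA true l = List.replicate l.length ' ' := by
  induction l with
  | nil => rfl
  | cons c rest ih =>
    simp only [List.mem_cons, not_or] at h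
    simp only [procA]
    simp only [if_neg (Ne.symm h.1 : ¬ c = '\n')]
    split <;> simp [ih h.2, List.replicate_succ]

theorem procA_line (l : List Char) (h : '\n' ∉ l) :
    procA false l = blankLine l := by
  induction l with
  | nil => rfl
  | cons c rest ih =>
    simp only [List.mem_cons, not_or] at h
    by_cases hp : ['/', '/'] <+: (c :: rest)
    · obtain ⟨hc, hh⟩ := (prefix_slash_iff c rest).1 hp
      have hfind := find_of_prefix _ hp
      subst hc
      simp only [procA, hh, and_self, if_true, if_neg (Ne.symm h.1 : ¬ ('/':Char) = '\n')]
      rw [procA_true_blank rest h.2]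
      rw [blankLine, hfind]
      simp [PySem.Chars.slice_eq_listSlice, PySem.List.pyRepeat_singleton,
        PySem.List.slice_to _ (le_refl (0:Int)), List.replicate_succ]
    · have hcond : ¬ (c = '/' ∧ rest.head? = some '/') := fun hx => hp ((prefix_slash_iff c rest).2 hx)
      simp only [procA, if_neg hcond, if_neg (Ne.symm h.1 : ¬ c = '\n'), Bool.false_eq_true,
        if_false, ih h.2]
      unfold blankLine
      rw [find_cons_of_not_prefix c rest hp]
      by_cases hr : PySem.Chars.find rest ['/', '/'] = -1
      · simp [hr]
      · have hnn : 0 ≤ PySem.Chars.find rest ['/', '/'] := by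
          have := PySem.Chars.neg_one_le_find rest ['/', '/']; omega
        rw [if_neg hr]
        rw [if_pos (by omega : PySem.Chars.find rest ['/', '/'] + 1 ≠ -1), if_pos hr]
        simp only [PySem.Chars.slice_eq_listSlice]
        rw [PySem.List.slice_to _ hnn, PySem.List.slice_to _ (by omega : (0:Int) ≤ PySem.Chars.find rest ['/', '/'] + 1),
          PySem.List.pyRepeat_singleton, PySem.List.pyRepeat_singleton]
        have h1 : (PySem.Chars.find rest ['/', '/'] + 1).toNat = (PySem.Chars.find rest ['/', '/']).toNat + 1 := by omega
        rw [h1, List.take_succ_cons]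
        have h2 : ((((c::rest).length : Int)) - (PySem.Chars.find rest ['/', '/'] + 1)).toNat
            = (((rest.length : Int)) - PySem.Chars.find rest ['/', '/']).toNat := by
          simp only [List.length_cons]; push_cast; omega
        rw [h2]
        simp

theorem procA_append (l rest : List Char) (h : '\n' ∉ l) :
    ∀ b, procA b (l ++ '\n' :: rest) = procA b l ++ '\n' :: procA false rest := by
  induction l with
  | nil =>
    intro b
    simp only [List.nil_append, procA]
    simp
  | cons c t ih =>
    intro b
    simp only [List.mem_cons, not_or] at h
    simp only [List.cons_append, procA]
    have hhead : (t ++ '\n' :: rest).head? = some '/' ↔ t.head? = some '/' := by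
      cases t <;> simp
    have hb1 : (if c = '/' ∧ (t ++ '\n' :: rest).head? = some '/' then true else b)
        = (if c = '/' ∧ t.head? = some '/' then true else b) := by
      simp only [hhead]
    rw [hb1, ih h.2]

theorem newline_decomp (cs : List Char) :
    '\n' ∉ cs ∨ ∃ l rest, cs = l ++ '\n' :: rest ∧ '\n' ∉ l := by
  induction cs with
  | nil => exact Or.inl (by simp)
  | cons c t ih =>
    by_cases hc : c = '\n'
    · exact Or.inr ⟨[], t, by simp [hc], by simp⟩
    · rcases ih with h | ⟨l, rest, rfl, hl⟩
      · exact Or.inl (by simp [Ne.symm hc, h])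
      · exact Or.inr ⟨c :: l, rest, by simp, by simp [Ne.symm hc, hl]⟩

theorem linesOf_no_newline (l : List Char) (h : '\n' ∉ l) : linesOf l = [l] := by
  induction l with
  | nil => rfl
  | cons c rest ih =>
    simp only [List.mem_cons, not_or] at h
    simp [linesOf, Ne.symm h.1, ih h.2, List.modifyHead]

theorem linesOf_append (l rest : List Char) (h : '\n' ∉ l) :
    linesOf (l ++ '\n' :: rest) = l :: linesOf rest := by
  induction l with
  | nil => simp [linesOf]
  | cons c t ih =>
    simp only [List.mem_cons, not_or] at h
    simp [linesOf, Ne.symm h.1, ih h.2, List.modifyHead]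

theorem main_eq_aux (n : Nat) : ∀ (cs : List Char), cs.length ≤ n →
    procA false cs = PySem.Chars.join ['\n'] ((linesOf cs).map blankLine) := by
  induction n with
  | zero =>
    intro cs h
    have : cs = [] := by cases cs <;> simp_all
    subst this
    rw [linesOf_no_newline [] (by simp), List.map_singleton, PySem.Chars.join_singleton,
      procA_line [] (by simp)]
  | succ n ih =>
    intro cs hlen
    rcases newline_decomp cs with h | ⟨l, rest, rfl, hl⟩
    · rw [linesOf_no_newline cs h, List.map_singleton, PySem.Chars.join_singleton,
        procA_line cs h]
    · rw [procA_append l rest hl false, linesOf_append l rest hl, List.map_cons]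
      have hrest : procA false rest = PySem.Chars.join ['\n'] ((linesOf rest).map blankLine) := by
        apply ih
        simp at hlen ⊢
        omega
      cases hm : (linesOf rest).map blankLine with
      | nil => exact absurd (List.map_eq_nil_iff.1 hm) (linesOf_ne_nil rest)
      | cons a t =>
        rw [PySem.Chars.join_cons_cons, procA_line l hl, hrest, hm]
        simp

theorem foldA_spec (code : String) (n : Nat) : ∀ (k : Nat) (acc : List Char) (b : Bool),
    code.toList.length - k = n →
    (((PySem.List.enumerate (code.toList.drop k) (k : Int)).foldl
      (fun (st : List Char × Bool) (p : Int × Char) =>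
        let b := if p.1 < PySem.Str.len code - 1 ∧ p.2 = '/' ∧ PySem.Str.pyGet? code (p.1 + 1) = some '/'
                 then true else st.2
        let b := if p.2 = '\n' then false else b
        (st.1 ++ [if b then ' ' else p.2], b))
      (acc, b)).1) = acc ++ procA b (code.toList.drop k) := by
  induction n with
  | zero =>
    intro k acc b h
    have hd : code.toList.drop k = [] := List.drop_eq_nil_iff.2 (by omega)
    rw [hd]
    simp [PySem.List.enumerate, procA]
  | succ n ih =>
    intro k acc b h
    have hk : k < code.toList.length := by omega
    have hd : code.toList.drop k = code.toList[k] :: code.toList.drop (k + 1) :=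
      List.drop_eq_getElem_cons hk
    rw [hd, PySem.List.enumerate_cons, List.foldl_cons]
    have hcast : ((k : Int) + 1) = ((k + 1 : Nat) : Int) := by push_cast; ring
    have hcond : ((k : Int) < PySem.Str.len code - 1 ∧ code.toList[k] = '/' ∧
          PySem.Str.pyGet? code ((k : Int) + 1) = some '/')
        ↔ (code.toList[k] = '/' ∧ (code.toList.drop (k + 1)).head? = some '/') := by
      rw [hcast, PySem.Str.pyGet?_natCast, List.head?_drop]
      unfold PySem.Str.len
      constructor
      · rintro ⟨-, h2, h3⟩; exact ⟨h2, h3⟩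
      · rintro ⟨h2, h3⟩
        refine ⟨?_, h2, h3⟩
        have : k + 1 < code.toList.length := by
          by_contra hge
          rw [List.getElem?_eq_none (by omega)] at h3
          simp at h3
        simp only [String.length_toList] at this ⊢
        omega
    simp only [hcond]
    rw [hcast, ih (k + 1) _ _ (by omega)]
    simp only [procA]
    simp

-- ===== VERDICT (by name: the statement is the Claim_ definition above) =====
theorem removeSingleLineComments_spec : Claim_equal_removeSingleLineComments := by
  intro code _
  unfold Spec_removeSingleLineComments removeSingleLineComments removeSingleLineComments_alt
  have h1 := foldA_spec code code.toList.length 0 [] false (by simp)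
  simp only [Nat.cast_zero, List.drop_zero, List.nil_append] at h1
  dsimp only
  rw [h1, splitOn_eq_linesOf]
  have hb : (fun line => let idx := PySem.Chars.find line ['/', '/'];
      if idx ≠ -1 then
        PySem.Chars.slice line none (some idx) ++ PySem.List.pyRepeat [' '] ((line.length : Int) - idx)
      else line) = blankLine := rfl
  rw [hb, main_eq_aux code.toList.length code.toList (le_refl _)]
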